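-- pv_equiv track=rewrite | github.com/jens62/geberit-aquaclean | aquaclean_console_app/aquaclean_core/Frames/FrameValidation.py | tl_getHighestOkFrameNo
-- ===== SOURCE A (Python) =====
-- def tl_getHighestOkFrameNo(var1, var2):
--     var3 = 0
--     var6 = 1
--
--     var5 = 0
--     while var5 < var2 and (var1[var5] & 255) == 255:
--         var3 += 8
--         var5 += 1
--
--     var4 = var3
--     if var5 < var2:
--         var2 = 0
--
--         while True:
--             var4 = var3
--             if var2 >= 8:
--                 break
--             var4 = var3
--             if (var1[var5] & var6) != var6:
--                 break
--             var3 += 1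
--             var6 = var6 << 1
--             var2 += 1
--
--     return var4
-- ===== SOURCE B (Python) =====
-- def tl_getHighestOkFrameNo(var1, var2):
--     count = 0
--     for i in range(var2):
--         b = var1[i] & 255
--         if b == 255:
--             count += 8
--         else:
--             count += (b ^ (b + 1)).bit_length() - 1
--             break
--     return count
-- ===== Notes on version B (the rewrite author's own statement) =====
-- stated objective: simpler
-- what changed: A's two separate loops (a whole-0xFF-byte loop, then an 8-iteration bit-by-bit loop with a shifting mask over the stopping byte) are merged into one uniform per-byte loop that adds 8 for a full byte and otherwise adds the closed-form trailing-ones count (b ^ (b+1)).bit_length() - 1 and breaks.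
import Mathlib
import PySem

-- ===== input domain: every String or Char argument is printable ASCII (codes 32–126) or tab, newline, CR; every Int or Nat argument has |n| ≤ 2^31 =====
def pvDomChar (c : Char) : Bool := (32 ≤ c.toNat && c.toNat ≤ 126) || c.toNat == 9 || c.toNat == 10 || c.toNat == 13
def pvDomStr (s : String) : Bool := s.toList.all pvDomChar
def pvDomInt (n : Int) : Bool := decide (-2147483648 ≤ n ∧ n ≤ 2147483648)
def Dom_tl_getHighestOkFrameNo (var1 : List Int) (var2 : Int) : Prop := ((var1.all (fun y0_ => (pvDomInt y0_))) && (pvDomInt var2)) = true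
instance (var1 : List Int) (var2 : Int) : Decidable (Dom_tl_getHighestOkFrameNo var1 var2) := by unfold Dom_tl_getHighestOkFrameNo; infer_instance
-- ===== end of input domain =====

-- B merges A's two loops (full-0xFF-byte loop + separate per-bit loop) into one per-byte pass
-- with a closed-form trailing-ones count; objective: simpler.

-- ===== PORT A =====
-- first while loop: while var5 < var2 and (var1[var5] & 255) == 255: var3 += 8; var5 += 1
-- (var1[var5] is PySem.List.pyGet?; the IndexError case is excluded by Pre_, .getD 0 there)
def pvALoop1 (var1 : List Int) (var2 var3 var5 : Int) : Int × Int :=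
  if h : var5 < var2 ∧ PySem.Int.band ((PySem.List.pyGet? var1 var5).getD 0) 255 = 255 then
    pvALoop1 var1 var2 (var3 + 8) (var5 + 1)
  else (var3, var5)
termination_by (var2 - var5).toNat
decreasing_by omega

-- second while loop (var2 reused as a 0..8 counter c): break when c ≥ 8 or bit not set
def pvALoop2 (var1 : List Int) (var5 var3 var6 c : Int) : Int :=
  if 8 ≤ c then var3
  else if PySem.Int.band ((PySem.List.pyGet? var1 var5).getD 0) var6 ≠ var6 then var3
  else pvALoop2 var1 var5 (var3 + 1) (var6 <<< (1 : Nat)) (c + 1)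
termination_by (8 - c).toNat
decreasing_by omega

def tl_getHighestOkFrameNo (var1 : List Int) (var2 : Int) : Int :=
  let p := pvALoop1 var1 var2 0 0
  let var3 := p.1
  let var5 := p.2
  let var4 := var3
  if var5 < var2 then pvALoop2 var1 var5 var3 1 0 else var4

-- ===== PORT B =====
-- for i in range(var2): b = var1[i] & 255; full byte → +8, else add trailing-ones closed form and break
def pvBLoop (var1 : List Int) (var2 i count : Int) : Int :=
  if hlt : i < var2 then
    let b := PySem.Int.band ((PySem.List.pyGet? var1 i).getD 0) 255
    if b = 255 then pvBLoop var1 var2 (i + 1) (count + 8)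
    else count + (PySem.Int.bitLength (PySem.Int.bxor b (b + 1)) : Int) - 1
  else count
termination_by (var2 - i).toNat
decreasing_by omega

def tl_getHighestOkFrameNo_alt (var1 : List Int) (var2 : Int) : Int :=
  pvBLoop var1 var2 0 0

-- ===== PRECONDITION & SPEC =====
-- Pre_ excludes exactly the inputs where Python A raises IndexError: var2 exceeds len(var1)
-- while every element of var1 is 0xFF modulo 256 (the scan runs off the end of the list).
def Pre_tl_getHighestOkFrameNo (var1 : List Int) (var2 : Int) : Prop :=
  var2 ≤ (var1.length : Int) ∨ ∃ x ∈ var1, PySem.Int.band x 255 ≠ 255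
instance (var1 : List Int) (var2 : Int) : Decidable (Pre_tl_getHighestOkFrameNo var1 var2) := by
  unfold Pre_tl_getHighestOkFrameNo; infer_instance

def pvWitness_tl_getHighestOkFrameNo : List Int × Int := ([255, 7], 2)

def Spec_tl_getHighestOkFrameNo (var1 : List Int) (var2 : Int) (out : Int) : Prop := out = tl_getHighestOkFrameNo_alt var1 var2
instance (var1 : List Int) (var2 : Int) (out : Int) : Decidable (Spec_tl_getHighestOkFrameNo var1 var2 out) := by unfold Spec_tl_getHighestOkFrameNo; infer_instance

-- ===== CLAIM (what is proved, stated in full; the proofs are below) =====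
def Claim_equal_tl_getHighestOkFrameNo : Prop := ∀ (var1 : List Int) (var2 : Int), Dom_tl_getHighestOkFrameNo var1 var2 → Pre_tl_getHighestOkFrameNo var1 var2 → Spec_tl_getHighestOkFrameNo var1 var2 (tl_getHighestOkFrameNo var1 var2)

-- ===== LEMMAS AND PROOFS =====

-- the closed-form trailing-ones expression of B, for element value g
def pvTr (g : Int) : Int :=
  (PySem.Int.bitLength (PySem.Int.bxor (PySem.Int.band g 255) (PySem.Int.band g 255 + 1)) : Int) - 1

-- structural-fuel model of A's second loop on a byte value n, fuel = 8 - c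
def pvTrailN (n : Nat) : Nat → Nat → Int
  | 0, _ => 0
  | fuel + 1, c =>
    if PySem.Int.band (n : Int) ((2 ^ c : Nat) : Int) ≠ ((2 ^ c : Nat) : Int) then 0
    else 1 + pvTrailN n fuel (c + 1)

lemma pvMask255 (c : Nat) (hc : c < 8) : 255 &&& 2 ^ c = 2 ^ c := by
  interval_cases c <;> decide

set_option maxRecDepth 8192 in
lemma pvSubMask : ∀ lm : Fin 256, ∀ c : Fin 8,
    2 ^ c.val - (lm.val &&& 2 ^ c.val) = (255 - lm.val) &&& 2 ^ c.val := by decide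

-- bridge: the low byte n of g determines every bit test A's second loop performs
lemma pvBridge (g : Int) : ∃ n : Nat, n < 256 ∧ PySem.Int.band g 255 = (n : Int) ∧
    ∀ c : Nat, c < 8 →
      PySem.Int.band g ((2 ^ c : Nat) : Int) = PySem.Int.band (n : Int) ((2 ^ c : Nat) : Int) := by
  by_cases hx : 0 ≤ g
  · refine ⟨g.toNat &&& 255, by have := Nat.and_le_right (n := g.toNat) (m := 255); omega, ?_, ?_⟩
    · rw [show (255 : Int) = ((255 : Nat) : Int) by norm_num, ← Int.toNat_of_nonneg hx,
        PySem.Int.band_natCast]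
      simp [max_eq_left hx]
    · intro c hc
      rw [← Int.toNat_of_nonneg hx, PySem.Int.band_natCast, PySem.Int.band_natCast,
        Nat.and_assoc, pvMask255 c hc]
      simp [max_eq_left hx]
  · rw [not_le] at hx
    set m : Nat := (-g - 1).toNat with hm
    have hband : ∀ b : Nat, PySem.Int.band g (b : Int) = ((b - (b &&& m) : Nat) : Int) := by
      intro b
      simp [PySem.Int.band, not_le.mpr hx, Int.toNat_natCast, ← hm]
    refine ⟨255 - (255 &&& m), by omega, by simpa using hband 255, ?_⟩
    intro c hc
    rw [hband (2 ^ c), PySem.Int.band_natCast]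
    congr 1
    have h1 : 2 ^ c &&& m = (m &&& 255) &&& 2 ^ c := by
      rw [Nat.and_assoc, pvMask255 c hc, Nat.and_comm]
    have h2 : 255 &&& m = m &&& 255 := Nat.and_comm _ _
    rw [h1, h2]
    have hlm : m &&& 255 < 256 := by
      have := Nat.and_le_right (n := m) (m := 255); omega
    exact pvSubMask ⟨m &&& 255, hlm⟩ ⟨c, hc⟩

-- A's second loop computes var3 + pvTrailN n (8-c) c
lemma pvLoop2_eq (var1 : List Int) (var5 : Int) (n : Nat)
    (hc : ∀ c : Nat, c < 8 →
      PySem.Int.band ((PySem.List.pyGet? var1 var5).getD 0) ((2 ^ c : Nat) : Int)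
        = PySem.Int.band (n : Int) ((2 ^ c : Nat) : Int)) :
    ∀ (fuel : Nat) (c var3 : Int), 0 ≤ c → c + fuel = 8 →
      pvALoop2 var1 var5 var3 ((2 ^ c.toNat : Nat) : Int) c = var3 + pvTrailN n fuel c.toNat := by
  intro fuel
  induction fuel with
  | zero =>
    intro c var3 h0 h8
    rw [pvALoop2]
    simp [show (8 : Int) ≤ c by omega, pvTrailN]
  | succ k ih =>
    intro c var3 h0 h8
    have hlt : c.toNat < 8 := by omega
    rw [pvALoop2]
    rw [if_neg (by omega)]
    rw [hc c.toNat hlt]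
    by_cases hb : PySem.Int.band (n : Int) ((2 ^ c.toNat : Nat) : Int) = ((2 ^ c.toNat : Nat) : Int)
    · rw [if_neg (not_not_intro hb)]
      have hshift : (((2 ^ c.toNat : Nat) : Int)) <<< (1 : Nat) = (((2 ^ (c + 1).toNat : Nat) : Int)) := by
        rw [Int.shiftLeft_eq]
        have : (c + 1).toNat = c.toNat + 1 := by omega
        rw [this]
        push_cast [pow_succ]
        ring
      rw [hshift, ih (c + 1) (var3 + 1) (by omega) (by omega)]
      have hcn : (c + 1).toNat = c.toNat + 1 := by omega
      rw [hcn, pvTrailN, if_neg (not_not_intro hb)]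
      ring
    · rw [if_pos hb]
      rw [pvTrailN, if_pos hb]
      ring

-- the closed form equals the bit loop, for every byte value
set_option maxRecDepth 8192 in
lemma pvTrailN_closed : ∀ n : Fin 256,
    pvTrailN n.val 8 0 = (PySem.Int.bitLength (PySem.Int.bxor (n.val : Int) ((n.val : Int) + 1)) : Int) - 1 := by
  decide

-- B's single loop equals A's first loop followed by the trailing-ones value
lemma pvBLoop_eq (var1 : List Int) (var2 : Int) : ∀ (i count : Int),
    pvBLoop var1 var2 i count =
      (let p := pvALoop1 var1 var2 count i
       if p.2 < var2 then p.1 + pvTr ((PySem.List.pyGet? var1 p.2).getD 0) else p.1) := by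
  intro i count
  by_cases hend : i < var2
  · by_cases hb : PySem.Int.band ((PySem.List.pyGet? var1 i).getD 0) 255 = 255
    · have hB : pvBLoop var1 var2 i count = pvBLoop var1 var2 (i + 1) (count + 8) := by
        rw [pvBLoop]; simp [hend, hb]
      have hA : pvALoop1 var1 var2 count i = pvALoop1 var1 var2 (count + 8) (i + 1) := by
        rw [pvALoop1, dif_pos ⟨hend, hb⟩]
      rw [hB, pvBLoop_eq var1 var2 (i + 1) (count + 8), hA]
    · have hA : pvALoop1 var1 var2 count i = (count, i) := by
        rw [pvALoop1, dif_neg (fun h => hb h.2)]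
      rw [pvBLoop, hA]
      simp [hend, hb, pvTr]
      ring
  · have hA : pvALoop1 var1 var2 count i = (count, i) := by
      rw [pvALoop1, dif_neg (fun h => hend h.1)]
    rw [pvBLoop, hA]
    simp [hend]
termination_by i _ => (var2 - i).toNat
decreasing_by omega

-- ===== VERDICT (by name: the statement is the Claim_ definition above) =====
theorem tl_getHighestOkFrameNo_spec : Claim_equal_tl_getHighestOkFrameNo := by
  intro var1 var2 _ _
  unfold Spec_tl_getHighestOkFrameNo tl_getHighestOkFrameNo tl_getHighestOkFrameNo_alt
  rw [pvBLoop_eq var1 var2 0 0]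
  simp only []
  set p := pvALoop1 var1 var2 0 0 with hp
  by_cases hlt : p.2 < var2
  · simp only [if_pos hlt]
    obtain ⟨n, hn, hband, hc⟩ := pvBridge ((PySem.List.pyGet? var1 p.2).getD 0)
    have h2 := pvLoop2_eq var1 p.2 n hc 8 0 p.1 (by omega) (by omega)
    norm_num at h2
    rw [h2, pvTrailN_closed ⟨n, hn⟩, pvTr, hband]
  · simp only [if_neg hlt]
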